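-- pv_equiv track=rewrite | github.com/EpistasisLab/SAFE | maze/robot.py | look_down
-- ===== SOURCE A (Python) =====
-- def maze_size(maze):
--     return len(maze), len(maze[0]) # height, width
--
-- def look_down(maze, pos):# look downward and return: distance to obstacle/wall, goal found?
--     height, width = maze_size(maze)
--     y,x = pos
--     goal_down = 0
--     dist = 0
--     hit_obs = False
--     y += 1
--     while y<height:
--         if maze[y][x]==3: goal_down = height
--         if not hit_obs and maze[y][x]==1:
--             dist += 1
--             hit_obs = True
--         elif not hit_obs:
--             dist += 1
--         y += 1
--     return dist, goal_down
-- ===== SOURCE B (Python) =====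
-- def look_down(maze, pos):
--     height = len(maze)
--     y, x = pos
--     col = [maze[yy][x] for yy in range(y + 1, height)]
--     dist = col.index(1) + 1 if 1 in col else len(col)
--     goal_down = height if 3 in col else 0
--     return dist, goal_down
-- ===== Notes on version B (the rewrite author's own statement) =====
-- stated objective: simpler
-- what changed: Replaces the while loop with its hit_obs flag by building the downward column once and answering the two questions with independent queries: dist = col.index(1)+1 if 1 in col else len(col), goal = height if 3 in col else 0.
-- crash fix: On an empty maze A raises IndexError (maze_size evaluates maze[0]); B returns (0, 0) whenever y >= -1 (the downward range is then empty). — e.g. on look_down([], (0, 0)): A raises IndexError, B returns (0, 0)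
import Mathlib
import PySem

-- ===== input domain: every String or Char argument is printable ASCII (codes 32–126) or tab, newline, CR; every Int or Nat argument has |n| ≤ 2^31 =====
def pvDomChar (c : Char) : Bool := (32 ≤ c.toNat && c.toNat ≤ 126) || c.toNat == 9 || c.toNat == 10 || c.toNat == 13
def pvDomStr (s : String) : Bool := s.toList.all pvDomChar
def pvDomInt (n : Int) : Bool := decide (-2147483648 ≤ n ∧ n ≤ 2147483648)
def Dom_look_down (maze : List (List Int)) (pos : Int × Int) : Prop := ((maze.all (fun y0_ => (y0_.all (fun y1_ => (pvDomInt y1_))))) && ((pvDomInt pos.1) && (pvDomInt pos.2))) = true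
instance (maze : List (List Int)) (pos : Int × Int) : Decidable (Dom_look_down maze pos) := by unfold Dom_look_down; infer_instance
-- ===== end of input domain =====

-- B builds the downward column once and answers the two questions with independent
-- queries (first index of 1, membership of 3) instead of A's flagged while loop; same cost.

-- ===== PORT A =====
-- the while loop: fuel = number of remaining iterations, y the current row index;
-- cell reads use pyGetD (the default is never reached inside Pre_look_down)
def lookLoopA (maze : List (List Int)) (height x : Int) :
    Nat → Int → Int → Int → Bool → Int × Int
  | 0, _, dist, goal, _ => (dist, goal)
  | n + 1, y, dist, goal, hit =>
    let c := PySem.List.pyGetD (PySem.List.pyGetD maze y []) x 0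
    let goal' := if c == 3 then height else goal
    if !hit && c == 1 then lookLoopA maze height x n (y + 1) (dist + 1) goal' true
    else if !hit then lookLoopA maze height x n (y + 1) (dist + 1) goal' hit
    else lookLoopA maze height x n (y + 1) dist goal' hit

def look_down (maze : List (List Int)) (pos : Int × Int) : Int × Int :=
  let height : Int := (maze.length : Int)
  let _width : Int := ((maze.headD []).length : Int)  -- len(maze[0]); raises on [] — excluded by Pre_
  let y := pos.1
  let x := pos.2
  lookLoopA maze height x (height - (y + 1)).toNat (y + 1) 0 0 false

-- ===== PORT B =====
def look_down_alt (maze : List (List Int)) (pos : Int × Int) : Int × Int :=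
  let height : Int := (maze.length : Int)
  let y := pos.1
  let x := pos.2
  let col : List Int := (PySem.List.pyRange (y + 1) height 1).map
    (fun yy => PySem.List.pyGetD (PySem.List.pyGetD maze yy []) x 0)
  let dist : Int := if col.contains 1 then ((PySem.List.index? col 1).getD 0 : Nat) + 1
                    else (col.length : Int)
  let goal_down : Int := if col.contains 3 then height else 0
  (dist, goal_down)

-- ===== PRECONDITION & SPEC =====
-- Pre_ excludes exactly the inputs where the Python A raises IndexError: the empty maze
-- (maze[0] in maze_size) and any scanned cell maze[yy][x] whose index is out of range.
def Pre_look_down (maze : List (List Int)) (pos : Int × Int) : Prop :=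
  maze ≠ [] ∧ ∀ yy ∈ PySem.List.pyRange (pos.1 + 1) (maze.length : Int) 1,
    ((PySem.List.pyGet? maze yy).bind (fun row => PySem.List.pyGet? row pos.2)).isSome = true
instance (maze : List (List Int)) (pos : Int × Int) : Decidable (Pre_look_down maze pos) := by
  unfold Pre_look_down; infer_instance
def pvWitness_look_down : List (List Int) × (Int × Int) := ([[0], [1]], (0, 0))

-- On an empty maze A raises IndexError (maze_size evaluates maze[0]); B returns (0, 0)
-- whenever pos.1 ≥ -1, since the downward range is then empty.
def Raises_look_down (maze : List (List Int)) (pos : Int × Int) : Prop :=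
  maze = [] ∧ -1 ≤ pos.1
instance (maze : List (List Int)) (pos : Int × Int) : Decidable (Raises_look_down maze pos) := by
  unfold Raises_look_down; infer_instance
def pvRaiseWitness_look_down : List (List Int) × (Int × Int) := ([], (0, 0))
def pvRaiseWitnessOut_look_down : Int × Int := (0, 0)

def Spec_look_down (maze : List (List Int)) (pos : Int × Int) (out : Int × Int) : Prop := out = look_down_alt maze pos
instance (maze : List (List Int)) (pos : Int × Int) (out : Int × Int) : Decidable (Spec_look_down maze pos out) := by unfold Spec_look_down; infer_instance

-- ===== CLAIM (what is proved, stated in full; the proofs are below) =====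
def Claim_equal_look_down : Prop := ∀ (maze : List (List Int)) (pos : Int × Int), Dom_look_down maze pos → Pre_look_down maze pos → Spec_look_down maze pos (look_down maze pos)
def Claim_raises_look_down : Prop := (∀ (maze : List (List Int)) (pos : Int × Int), Dom_look_down maze pos → Raises_look_down maze pos → ¬ Pre_look_down maze pos) ∧ (Dom_look_down (pvRaiseWitness_look_down.1) (pvRaiseWitness_look_down.2) ∧ Raises_look_down (pvRaiseWitness_look_down.1) (pvRaiseWitness_look_down.2) ∧ look_down_alt (pvRaiseWitness_look_down.1) (pvRaiseWitness_look_down.2) = pvRaiseWitnessOut_look_down)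

-- ===== LEMMAS AND PROOFS =====

-- A's loop, abstracted over the list of scanned cell values
def aList (h : Int) : List Int → Int → Int → Bool → Int × Int
  | [], dist, goal, _ => (dist, goal)
  | c :: cs, dist, goal, hit =>
    let goal' := if c == 3 then h else goal
    if !hit && c == 1 then aList h cs (dist + 1) goal' true
    else if !hit then aList h cs (dist + 1) goal' hit
    else aList h cs dist goal' hit

-- B's dist query on a cell list
def distOf (cs : List Int) : Int :=
  if cs.contains 1 then ((PySem.List.index? cs 1).getD 0 : Nat) + 1 else (cs.length : Int)

lemma lookLoopA_eq_aList (maze : List (List Int)) (h x : Int) :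
    ∀ (n : Nat) (y dist goal : Int) (hit : Bool),
    lookLoopA maze h x n y dist goal hit =
      aList h ((PySem.List.pyRange y (y + n) 1).map
        (fun yy => PySem.List.pyGetD (PySem.List.pyGetD maze yy []) x 0)) dist goal hit := by
  intro n
  induction n with
  | zero =>
    intro y dist goal hit
    rw [PySem.List.pyRange_one_eq_nil (by omega)]
    rfl
  | succ n ih =>
    intro y dist goal hit
    rw [PySem.List.pyRange_one_cons (by push_cast; omega)]
    have hstop : y + ((n : Int) + 1) = (y + 1) + (n : Int) := by omega
    simp only [List.map_cons, lookLoopA, aList]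
    push_cast
    rw [hstop]
    split_ifs <;> rw [ih]

lemma aList_eq (h : Int) :
    ∀ (cs : List Int) (dist goal : Int) (hit : Bool),
    aList h cs dist goal hit =
      (dist + (if hit then 0 else distOf cs), if cs.contains 3 then h else goal) := by
  intro cs
  induction cs with
  | nil =>
    intro dist goal hit
    simp [aList, distOf]
  | cons c cs ih =>
    intro dist goal hit
    have hgoal : ∀ g : Int,
        (if (c :: cs).contains 3 then h else g) =
        (if cs.contains 3 then h else (if c = 3 then h else g)) := by
      intro g
      rw [List.contains_cons]
      by_cases hc3 : c = 3
      · subst hc3; simp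
      · have h3c : ((3 : Int) == c) = false := by
          simp only [beq_eq_false_iff_ne]; exact fun h' => hc3 h'.symm
        simp [h3c, hc3]
    cases hit with
    | true =>
      have hstep : aList h (c :: cs) dist goal true =
          aList h cs dist (if c == 3 then h else goal) true := rfl
      rw [hstep, ih, hgoal]
      simp
    | false =>
      by_cases hc1 : c = 1
      · subst hc1
        have hstep : aList h ((1 : Int) :: cs) dist goal false =
            aList h cs (dist + 1) goal true := rfl
        have hd : distOf ((1 : Int) :: cs) = 1 := by
          rw [distOf, PySem.List.index?_cons_self]
          simp
        rw [hstep, ih, hgoal, hd]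
        norm_num
      · have h1c : ((1 : Int) == c) = false := by
          simp only [beq_eq_false_iff_ne]; exact fun h' => hc1 h'.symm
        have hd : distOf (c :: cs) = 1 + distOf cs := by
          rw [distOf, distOf, PySem.List.index?_cons_of_ne cs hc1, List.contains_cons, h1c]
          by_cases hmem : cs.contains 1 = true
          · obtain ⟨k, hk⟩ := Option.isSome_iff_exists.mp
              ((PySem.List.index?_isSome_iff cs 1).mpr (by simpa using hmem))
            rw [hk, hmem]
            simp
            omega
          · rw [Bool.not_eq_true] at hmem
            rw [hmem]
            simp [List.length_cons]
            omega
        have hstep : aList h (c :: cs) dist goal false =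
            aList h cs (dist + 1) (if c = 3 then h else goal) false := by
          simp only [aList, Bool.not_false, Bool.true_and, beq_iff_eq]
          rw [if_neg hc1, if_pos trivial]
        rw [hstep, ih, hgoal, hd]
        simp [add_assoc]

lemma look_down_eq_alt (maze : List (List Int)) (pos : Int × Int) :
    look_down maze pos = look_down_alt maze pos := by
  unfold look_down look_down_alt
  obtain ⟨y, x⟩ := pos
  simp only []
  by_cases hle : y + 1 ≤ (maze.length : Int)
  · have hrange : (y + 1) + (((maze.length : Int) - (y + 1)).toNat : Int) = (maze.length : Int) := by
      omega
    rw [lookLoopA_eq_aList, hrange, aList_eq]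
    simp [distOf]
  · have hfuel : ((maze.length : Int) - (y + 1)).toNat = 0 := by omega
    rw [hfuel, PySem.List.pyRange_one_eq_nil (by omega)]
    simp [lookLoopA]

-- ===== VERDICT (by name: the statement is the Claim_ definition above) =====
theorem look_down_spec : Claim_equal_look_down := by
  intro maze pos _ _
  unfold Spec_look_down
  exact look_down_eq_alt maze pos

theorem look_down_raises : Claim_raises_look_down := by
  unfold Claim_raises_look_down
  refine ⟨?_, by decide⟩
  intro maze pos _ hr hp
  exact hp.1 hr.1

-- witness self-check: B's port really returns the stated value where A raises
theorem pvRaiseWitness_look_down_ok :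
    look_down_alt pvRaiseWitness_look_down.1 pvRaiseWitness_look_down.2 =
      pvRaiseWitnessOut_look_down :=
  look_down_raises.2.2.2
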